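-- pv_equiv track=rewrite | github.com/mjirik/io3d | io3d/dili.py | kick_from_dict
-- ===== SOURCE A (Python) =====
-- import collections
--
-- def kick_from_dict(dct, keys):
--     if type(dct) == collections.OrderedDict:
--         p = collections.OrderedDict()
--     else:
--         p = {}
--     for key, value in dct.items():
--         if key not in keys:
--             p[key] = value
--
--     # p = {key: value for key, value in dct.items() if key not in keys}
--     return p
-- ===== SOURCE B (Python) =====
-- import collections
--
-- def kick_from_dict(dct, keys):
--     p = dct.copy()
--     for key in keys:
--         if key in p:
--             del p[key]
--     return p
-- ===== Notes on version B (the rewrite author's own statement) =====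
-- stated objective: faster
-- what changed: B copies the whole dict once and iterates over the removal keys deleting each one present, instead of scanning every item of dct and testing list membership in keys for each item.
import Mathlib
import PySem

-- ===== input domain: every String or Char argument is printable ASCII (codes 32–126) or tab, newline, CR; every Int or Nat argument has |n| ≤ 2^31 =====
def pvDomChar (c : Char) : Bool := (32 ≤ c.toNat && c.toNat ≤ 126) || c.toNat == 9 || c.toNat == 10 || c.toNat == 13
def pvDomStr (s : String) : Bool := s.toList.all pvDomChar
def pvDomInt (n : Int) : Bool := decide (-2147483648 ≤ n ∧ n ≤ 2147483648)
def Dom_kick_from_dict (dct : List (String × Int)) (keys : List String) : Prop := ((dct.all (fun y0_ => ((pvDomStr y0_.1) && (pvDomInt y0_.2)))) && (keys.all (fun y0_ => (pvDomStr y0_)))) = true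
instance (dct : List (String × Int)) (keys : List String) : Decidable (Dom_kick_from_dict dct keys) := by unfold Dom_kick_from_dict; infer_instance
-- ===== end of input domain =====

-- B copies the dict once and deletes each removal key from the copy instead of rebuilding item by item (return value only; neither mutates its argument as ported).
-- ===== PORT A =====
-- literal port of A: build a fresh dict, inserting every item of dct whose key is not in keys
def kick_from_dict (dct : List (String × Int)) (keys : List String) : List (String × Int) :=
  (dct.foldl (fun p kv => if keys.contains kv.1 then p else p.insert kv.1 kv.2)
    (PySem.Dict.empty : PySem.Dict String Int)).items

-- ===== PORT B =====
-- B's `for key in keys: if key in p: del p[key]` loop, as structural recursion over keys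
def pvDelKeys : List String → PySem.Dict String Int → PySem.Dict String Int
  | [], p => p
  | k :: ks, p => pvDelKeys ks (if p.contains k then p.erase k else p)

def kick_from_dict_alt (dct : List (String × Int)) (keys : List String) : List (String × Int) :=
  (pvDelKeys keys (PySem.Dict.ofList dct)).items

-- ===== PRECONDITION & SPEC =====
def Spec_kick_from_dict (dct : List (String × Int)) (keys : List String) (out : List (String × Int)) : Prop := out = kick_from_dict_alt dct keys
instance (dct : List (String × Int)) (keys : List String) (out : List (String × Int)) : Decidable (Spec_kick_from_dict dct keys out) := by unfold Spec_kick_from_dict; infer_instance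

-- ===== CLAIM (what is proved, stated in full; the proofs are below) =====
def Claim_equal_kick_from_dict : Prop := ∀ (dct : List (String × Int)) (keys : List String), Dom_kick_from_dict dct keys → Spec_kick_from_dict dct keys (kick_from_dict dct keys)

-- ===== LEMMAS AND PROOFS =====

-- filter a dict's items by "key not in keys"
def filterD (keys : List String) (d : PySem.Dict String Int) : PySem.Dict String Int :=
  PySem.Dict.mk (d.items.filter (fun p => !keys.contains p.1))

-- B's loop body is just erase (erasing an absent key is a no-op)
lemma erase_step (d : PySem.Dict String Int) (k : String) :
    (if d.contains k then d.erase k else d) = d.erase k := by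
  split_ifs with h
  · rfl
  · apply PySem.Dict.ext
    simp only [PySem.Dict.erase]
    refine (List.filter_eq_self.mpr ?_).symm
    intro p hp
    simp only [PySem.Dict.contains, List.any_eq_true, not_exists] at h
    have := h p
    simp at this ⊢
    exact this hp

-- deleting all keys of ks equals one filter over the items
lemma erase_loop (ks : List String) (d : PySem.Dict String Int) :
    pvDelKeys ks d = filterD ks d := by
  induction ks generalizing d with
  | nil =>
    apply PySem.Dict.ext
    simp [filterD, pvDelKeys]
  | cons k ks ih =>
    rw [pvDelKeys, erase_step, ih]
    apply PySem.Dict.ext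
    simp only [filterD, PySem.Dict.erase, List.filter_filter]
    apply List.filter_congr
    intro p _
    by_cases h : p.1 = k <;> simp [h, Bool.and_comm]

-- filtering by "key not in keys" commutes with the overwrite map of Dict.insert
lemma filter_map_replace (keys : List String) (k : String) (v : Int) (l : List (String × Int)) :
    (l.map (fun p => if p.1 == k then (k, v) else p)).filter (fun p => !keys.contains p.1)
      = (l.filter (fun p => !keys.contains p.1)).map (fun p => if p.1 == k then (k, v) else p) := by
  rw [List.filter_map]
  congr 1
  apply List.filter_congr
  intro p _
  by_cases hpk : p.1 == k
  · have hk : p.1 = k := by simpa using hpk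
    simp [Function.comp, hk]
  · simp [Function.comp, hpk]

-- A's conditional insert commutes with filtering: one step
lemma cond_insert_step (keys : List String) (b : PySem.Dict String Int) (k : String) (v : Int) :
    (if keys.contains k then filterD keys b else (filterD keys b).insert k v)
      = filterD keys (b.insert k v) := by
  by_cases hk : keys.contains k
  · -- key removed by the filter on both sides
    have hkm : k ∈ keys := by simpa using hk
    simp only [hk, if_true]
    apply PySem.Dict.ext
    simp only [filterD, PySem.Dict.insert]
    by_cases hb : b.contains k
    · simp only [hb, if_true, filter_map_replace]
      have hid : ∀ p ∈ b.items.filter (fun p => !keys.contains p.1),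
          (if p.1 == k then (k, v) else p) = id p := by
        intro p hp
        have hpred := List.of_mem_filter hp
        have hne : (p.1 == k) = false := by
          by_contra h
          have hpk : p.1 = k := by
            simpa using (Bool.of_not_eq_false h)
          rw [hpk] at hpred
          simp [hkm] at hpred
        simp [hne]
      rw [List.map_congr_left hid, List.map_id]
    · simp only [hb]
      simp [hkm]
  · -- key kept by the filter on both sides
    have hkm : k ∉ keys := by simpa using hk
    have hconds : ((b.items.filter (fun p => !keys.contains p.1)).any (fun p => p.1 == k))
        = (b.items.any fun p => p.1 == k) := by
      rw [List.any_filter]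
      congr 1
      funext p
      by_cases hpk : p.1 == k
      · have hpe : p.1 = k := by simpa using hpk
        simp [hpe, hkm]
      · simp [hpk]
    rw [if_neg hk]
    apply PySem.Dict.ext
    simp only [filterD, PySem.Dict.insert, PySem.Dict.contains]
    rw [hconds]
    by_cases hb : (b.items.any fun p => p.1 == k) = true
    · simp only [hb, if_true, filter_map_replace]
    · simp only [Bool.not_eq_true] at hb
      simp only [hb, Bool.false_eq_true, if_false, List.filter_append]
      simp [hkm]

-- A's loop computes the filter of the full rebuild
lemma insert_loop (keys : List String) (dct : List (String × Int)) (b : PySem.Dict String Int) :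
    dct.foldl (fun p kv => if keys.contains kv.1 then p else p.insert kv.1 kv.2) (filterD keys b)
      = filterD keys (dct.foldl (fun p kv => p.insert kv.1 kv.2) b) := by
  induction dct generalizing b with
  | nil => rfl
  | cons kv dct ih =>
    simp only [List.foldl_cons, cond_insert_step, ih]

-- ===== VERDICT (by name: the statement is the Claim_ definition above) =====
theorem kick_from_dict_spec : Claim_equal_kick_from_dict := by
  intro dct keys _
  unfold Spec_kick_from_dict kick_from_dict kick_from_dict_alt
  rw [erase_loop]
  have hempty : (PySem.Dict.empty : PySem.Dict String Int) = filterD keys PySem.Dict.empty := by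
    apply PySem.Dict.ext; rfl
  rw [hempty, insert_loop]
  rfl
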